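-- pv_equiv track=rewrite | github.com/aosid/nand2tetris | 06/assembler.py | ClearFile
-- ===== SOURCE A (Python) =====
-- def InitSymbolTable():
--     SymbolTable = dict(SP=0,
--                    LCL=1,
--                    ARG=2,
--                    THIS=3,
--                    THAT=4,
--                    SCREEN=16384,
--                    KBD=24576)
--     for i in range(0,16):
--         k = 'R'+str(i)
--         SymbolTable[k]=i
--     return SymbolTable
--
-- def ClearFile(file):
--     newfile=[]
--     for i in range(len(file)):
--         line = file[i].strip()
--         CommentIndex = line.find('//')  #find and remove comments
--         if CommentIndex == 0:
--             line = ""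
--         if CommentIndex > 0:
--             line=line[0:CommentIndex].strip()
--         if line != "":
--             newfile.append(line)            #collects all non-empty lines
--     keys = InitSymbolTable()          #collects addresses for symbols
--     nextaddress=16
--     i=0
--     while i < len(newfile):            #pop (Xxx), save index
--         if newfile[i][0]=="(":
--             k=newfile.pop(i).strip("()")
--             keys[k]=i
--         else:
--             i+=1
--     for i in range(len(newfile)):           #replace symbols with addresses,
--         if newfile[i][0] == '@':            #assigning addresses as needed
--             k = newfile[i].strip("@")
--             if not k.isnumeric():
--                 if not k in keys.keys():
--                     keys[k]=nextaddress
--                     nextaddress += 1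
--                 newfile[i] = '@' + str(keys[k])
--     return newfile
-- ===== SOURCE B (Python) =====
-- def ClearFile(file):
--     keys = dict(SP=0, LCL=1, ARG=2, THIS=3, THAT=4, SCREEN=16384, KBD=24576)
--     for i in range(0, 16):
--         keys['R' + str(i)] = i
--     instructions = []
--     for raw in file:                       # single fused pass: clean + collect labels
--         line = raw.strip()
--         idx = line.find('//')
--         if idx != -1:
--             line = line[:idx].strip()
--         if line == "":
--             continue
--         if line[0] == '(':
--             keys[line.strip('()')] = len(instructions)
--         else:
--             instructions.append(line)
--     out = []
--     nextaddress = 16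
--     for line in instructions:              # resolution pass built into a fresh list
--         if line[0] == '@':
--             k = line.strip('@')
--             if not k.isnumeric():
--                 if k not in keys:
--                     keys[k] = nextaddress
--                     nextaddress += 1
--                 line = '@' + str(keys[k])
--         out.append(line)
--     return out
-- ===== Notes on version B (the rewrite author's own statement) =====
-- stated objective: alternative
-- what changed: B fuses A's comment-stripping pass and its label-popping while-loop (which rebuilds the list with pop(i)) into one pass that records each label's address as the running instruction count, and the '@'-resolution pass builds a fresh output list instead of mutating in place.
import Mathlib
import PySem

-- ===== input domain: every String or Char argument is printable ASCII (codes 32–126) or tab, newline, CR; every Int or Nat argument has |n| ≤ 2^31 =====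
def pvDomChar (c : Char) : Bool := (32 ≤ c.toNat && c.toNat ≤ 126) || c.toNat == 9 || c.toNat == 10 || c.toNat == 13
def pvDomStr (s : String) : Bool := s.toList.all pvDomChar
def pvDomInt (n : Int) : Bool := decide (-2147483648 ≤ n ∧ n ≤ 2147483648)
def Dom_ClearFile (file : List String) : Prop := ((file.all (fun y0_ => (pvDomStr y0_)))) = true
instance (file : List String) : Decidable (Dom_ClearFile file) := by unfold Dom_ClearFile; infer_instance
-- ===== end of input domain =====

-- B fuses A's first two scans (comment stripping and the label-popping while loop) into one
-- pass that records each label's address as the running instruction count, and rebuilds the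
-- resolution pass as a fresh output list; objective: simpler (same asymptotic cost).
-- '.isnumeric()' is ported as strIsdigit: the two agree on the printable-ASCII domain Dom_.

-- ===== PORT A =====
def InitSymbolTable : PySem.Dict String Int :=
  (PySem.List.pyRange 0 16 1).foldl
    (fun d i => d.insert ("R" ++ PySem.Int.toStr i) i)
    (PySem.Dict.ofList [("SP", 0), ("LCL", 1), ("ARG", 2), ("THIS", 3), ("THAT", 4),
                        ("SCREEN", 16384), ("KBD", 24576)])

-- the 'while i < len(newfile)' loop that pops '(label)' lines and records their index
def popLabels (newfile : List String) (keys : PySem.Dict String Int) (i : Nat) :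
    List String × PySem.Dict String Int :=
  if h : i < newfile.length then
    -- newfile[i][0] == "(" : every line here is nonempty, so the 'none' branch is unreachable
    if PySem.Str.pyGet? newfile[i] 0 = some '(' then
      popLabels (newfile.eraseIdx i)
        (keys.insert (PySem.Str.stripChars newfile[i] "()") (i : Int)) i
    else
      popLabels newfile keys (i + 1)
  else (newfile, keys)
termination_by newfile.length - i
decreasing_by
  · simp [List.length_eraseIdx, h]; omega
  · omega

-- the 'for i in range(len(newfile))' loop that rewrites '@symbol' in place
def resolvePass (newfile : List String) (keys : PySem.Dict String Int) (next : Int) (i : Nat) :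
    List String :=
  if h : i < newfile.length then
    if PySem.Str.pyGet? newfile[i] 0 = some '@' then
      -- 'k = newfile[i].strip("@")' is inlined at its two uses below
      if ¬ PySem.Str.strIsdigit (PySem.Str.stripChars newfile[i] "@") then
        if ¬ keys.contains (PySem.Str.stripChars newfile[i] "@") then
          -- the 'keys[k]=nextaddress; nextaddress+=1' path of the mutation
          resolvePass
            (newfile.set i ("@" ++ PySem.Int.toStr
              ((keys.insert (PySem.Str.stripChars newfile[i] "@") next).getD
                (PySem.Str.stripChars newfile[i] "@") 0)))
            (keys.insert (PySem.Str.stripChars newfile[i] "@") next) (next + 1) (i + 1)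
        else
          resolvePass
            (newfile.set i ("@" ++ PySem.Int.toStr (keys.getD (PySem.Str.stripChars newfile[i] "@") 0)))
            keys next (i + 1)
      else resolvePass newfile keys next (i + 1)
    else resolvePass newfile keys next (i + 1)
  else newfile
termination_by newfile.length - i
decreasing_by
  · simp; omega
  · simp; omega
  · omega
  · omega

def ClearFile (file : List String) : List String :=
  let newfile := file.foldl (fun newfile l =>
    let line := PySem.Str.strip l
    let ci := PySem.Str.find line "//"
    let line := if ci = 0 then "" else line
    let line := if ci > 0 then PySem.Str.strip (PySem.Str.slice line (some 0) (some ci)) else line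
    if line ≠ "" then newfile ++ [line] else newfile) []
  let p := popLabels newfile InitSymbolTable 0
  resolvePass p.1 p.2 16 0

-- ===== PORT B =====
-- B's per-line cleaning ('line = raw.strip(); idx = line.find("//"); if idx != -1: ...')
def cleanLine (l : String) : String :=
  let line := PySem.Str.strip l
  let ci := PySem.Str.find line "//"
  if ci ≠ -1 then PySem.Str.strip (PySem.Str.slice line none (some ci)) else line

-- B's Python builds the predefined table with the same code as A's InitSymbolTable helper,
-- so the port reuses that definition; its two loops are ported as the two folds below.
def ClearFile_alt (file : List String) : List String :=
  let st := file.foldl (fun (st : List String × PySem.Dict String Int) raw =>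
      if cleanLine raw = "" then st
      else if PySem.Str.pyGet? (cleanLine raw) 0 = some '(' then
        (st.1, st.2.insert (PySem.Str.stripChars (cleanLine raw) "()") (st.1.length : Int))
      else (st.1 ++ [cleanLine raw], st.2)) ([], InitSymbolTable)
  let res := st.1.foldl (fun (st : List String × PySem.Dict String Int × Int) line =>
      if PySem.Str.pyGet? line 0 = some '@' then
        if ¬ PySem.Str.strIsdigit (PySem.Str.stripChars line "@") then
          if ¬ st.2.1.contains (PySem.Str.stripChars line "@") then
            (st.1 ++ ["@" ++ PySem.Int.toStr
                ((st.2.1.insert (PySem.Str.stripChars line "@") st.2.2).getD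
                  (PySem.Str.stripChars line "@") 0)],
             st.2.1.insert (PySem.Str.stripChars line "@") st.2.2, st.2.2 + 1)
          else (st.1 ++ ["@" ++ PySem.Int.toStr (st.2.1.getD (PySem.Str.stripChars line "@") 0)], st.2)
        else (st.1 ++ [line], st.2)
      else (st.1 ++ [line], st.2)) ([], st.2, 16)
  res.1

-- ===== PRECONDITION & SPEC =====
def Spec_ClearFile (file : List String) (out : List String) : Prop := out = ClearFile_alt file
instance (file : List String) (out : List String) : Decidable (Spec_ClearFile file out) := by
  unfold Spec_ClearFile; infer_instance

-- ===== CLAIM (what is proved, stated in full; the proofs are below) =====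
def Claim_equal_ClearFile : Prop := ∀ (file : List String), Dom_ClearFile file → Spec_ClearFile file (ClearFile file)

-- ===== LEMMAS AND PROOFS =====

-- abstract fused first pass (label collection over cleaned nonempty lines)
def fuse1 : List String → PySem.Dict String Int → Nat → List String × PySem.Dict String Int
  | [], k, _ => ([], k)
  | s :: r, k, n =>
    if PySem.Str.pyGet? s 0 = some '(' then
      fuse1 r (k.insert (PySem.Str.stripChars s "()") (n : Int)) n
    else
      let p := fuse1 r k (n + 1)
      (s :: p.1, p.2)

-- abstract fused resolution pass
def fuse2 : List String → PySem.Dict String Int → Int → List String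
  | [], _, _ => []
  | s :: r, k, n =>
    if PySem.Str.pyGet? s 0 = some '@' then
      if ¬ PySem.Str.strIsdigit (PySem.Str.stripChars s "@") then
        if ¬ k.contains (PySem.Str.stripChars s "@") then
          ("@" ++ PySem.Int.toStr ((k.insert (PySem.Str.stripChars s "@") n).getD
              (PySem.Str.stripChars s "@") 0))
            :: fuse2 r (k.insert (PySem.Str.stripChars s "@") n) (n + 1)
        else ("@" ++ PySem.Int.toStr (k.getD (PySem.Str.stripChars s "@") 0)) :: fuse2 r k n
      else s :: fuse2 r k n
    else s :: fuse2 r k n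

theorem eraseIdx_append_cons (pre r : List String) (s : String) :
    (pre ++ s :: r).eraseIdx pre.length = pre ++ r := by
  induction pre with
  | nil => simp
  | cons a t ih => simpa using ih

theorem set_append_cons (pre r : List String) (s x : String) :
    (pre ++ s :: r).set pre.length x = pre ++ x :: r := by
  induction pre with
  | nil => simp
  | cons a t ih => simp [ih]

theorem cleanA_eq_cleanLine (l : String) :
    (let line := PySem.Str.strip l
     let ci := PySem.Str.find line "//"
     let line := if ci = 0 then "" else line
     if ci > 0 then PySem.Str.strip (PySem.Str.slice line (some 0) (some ci)) else line)
      = cleanLine l := by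
  unfold cleanLine
  simp only []
  set line := PySem.Str.strip l with hl
  set ci := PySem.Str.find line "//" with hc
  have h1 : -1 ≤ ci := by
    rw [hc]; simp [PySem.Str.find]; exact PySem.Chars.neg_one_le_find _ _
  rcases lt_trichotomy ci 0 with h | h | h
  · have : ci = -1 := by omega
    simp [this]
  · rw [if_pos h, if_neg (by omega : ¬ ci > 0), if_pos (by omega : ci ≠ -1), h]
    have h2 : PySem.Str.slice line none (some 0) = "" := by
      simp [PySem.Str.slice, PySem.List.slice_to]
    rw [h2]
    rfl
  · rw [if_neg (by omega : ¬ ci = 0), if_pos h, if_pos (by omega : ci ≠ -1)]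
    congr 1

theorem passA1_gen (file acc : List String) :
    file.foldl (fun newfile l =>
      let line := PySem.Str.strip l
      let ci := PySem.Str.find line "//"
      let line := if ci = 0 then "" else line
      let line := if ci > 0 then PySem.Str.strip (PySem.Str.slice line (some 0) (some ci)) else line
      if line ≠ "" then newfile ++ [line] else newfile) acc
    = acc ++ (file.map cleanLine).filter (· ≠ "") := by
  induction file generalizing acc with
  | nil => simp
  | cons x r ih =>
    simp only [List.foldl_cons, List.map_cons, List.filter_cons]
    rw [cleanA_eq_cleanLine x]
    by_cases hx : cleanLine x = ""
    · simp only [hx]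
      rw [if_neg (by simp), ih]
      simp
    · simp only [if_pos (by simpa using hx)]
      rw [ih]
      simp [hx]

theorem popLabels_eq_fuse1 (r : List String) (pre : List String) (k : PySem.Dict String Int) :
    popLabels (pre ++ r) k pre.length
      = (pre ++ (fuse1 r k pre.length).1, (fuse1 r k pre.length).2) := by
  induction r generalizing pre k with
  | nil =>
    rw [popLabels]
    simp [fuse1]
  | cons s r ih =>
    rw [popLabels]
    have hlen : pre.length < (pre ++ s :: r).length := by simp
    rw [dif_pos hlen]
    have hge : (pre ++ s :: r)[pre.length]'hlen = s := by
      simp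
    rw [hge]
    by_cases hp : PySem.List.pyGet? s.toList 0 = some '('
    · rw [show PySem.Str.pyGet? s 0 = PySem.List.pyGet? s.toList 0 by
        simp only [PySem.Str.pyGet?_eq, PySem.Chars.pyGet?_eq_listPyGet?], if_pos hp,
        eraseIdx_append_cons]
      rw [ih]
      simp [fuse1, hp]
    · rw [show PySem.Str.pyGet? s 0 = PySem.List.pyGet? s.toList 0 by
        simp only [PySem.Str.pyGet?_eq, PySem.Chars.pyGet?_eq_listPyGet?], if_neg hp]
      have : pre.length + 1 = (pre ++ [s]).length := by simp
      rw [show pre ++ s :: r = (pre ++ [s]) ++ r by simp, this, ih]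
      simp [fuse1, hp]

theorem passB1_eq (r : List String) (acc : List String) (k : PySem.Dict String Int) :
    r.foldl (fun (st : List String × PySem.Dict String Int) line =>
      if PySem.Str.pyGet? line 0 = some '(' then
        (st.1, st.2.insert (PySem.Str.stripChars line "()") (st.1.length : Int))
      else (st.1 ++ [line], st.2)) (acc, k)
    = (acc ++ (fuse1 r k acc.length).1, (fuse1 r k acc.length).2) := by
  induction r generalizing acc k with
  | nil => simp [fuse1]
  | cons s r ih =>
    simp only [List.foldl_cons]
    by_cases hp : PySem.List.pyGet? s.toList 0 = some '('
    all_goals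
      rw [show PySem.Str.pyGet? s 0 = PySem.List.pyGet? s.toList 0 by
        simp only [PySem.Str.pyGet?_eq, PySem.Chars.pyGet?_eq_listPyGet?]]
    · rw [if_pos hp, ih]
      simp [fuse1, hp]
    · rw [if_neg hp, ih]
      simp [fuse1, hp]

theorem resolvePass_eq_fuse2 (r : List String) (pre : List String)
    (k : PySem.Dict String Int) (n : Int) :
    resolvePass (pre ++ r) k n pre.length = pre ++ fuse2 r k n := by
  induction r generalizing pre k n with
  | nil =>
    rw [resolvePass]
    simp [fuse2]
  | cons s r ih =>
    rw [resolvePass]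
    have hlen : pre.length < (pre ++ s :: r).length := by simp
    rw [dif_pos hlen]
    have hge : (pre ++ s :: r)[pre.length]'hlen = s := by simp
    rw [hge]
    have hstep : ∀ x : String, pre ++ x :: r = (pre ++ [x]) ++ r := by simp
    have hlen1 : ∀ x : String, pre.length + 1 = (pre ++ [x]).length := by simp
    by_cases hp : PySem.Str.pyGet? s 0 = some '@'
    · have hp' : PySem.List.pyGet? s.toList 0 = some '@' := by simpa using hp
      rw [if_pos hp]
      by_cases hd : PySem.Str.strIsdigit (PySem.Str.stripChars s "@") = true
      · have hd' : PySem.Chars.strIsdigit (PySem.Chars.stripChars s.toList ['@']) = true := by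
          simpa using hd
        rw [if_neg (by simpa using hd)]
        rw [hstep s, hlen1 s, ih]
        simp [fuse2, hp', hd']
      · have hd' : PySem.Chars.strIsdigit (PySem.Chars.stripChars s.toList ['@']) = false := by
          simpa using hd
        rw [if_pos (by simpa using hd)]
        by_cases hc : k.contains (PySem.Str.stripChars s "@") = true
        · rw [if_neg (by simpa using hc), set_append_cons, hstep _, hlen1 _, ih]
          simp [fuse2, hp', hd', hc]
        · have hc' : k.contains (PySem.Str.stripChars s "@") = false := by simpa using hc
          rw [if_pos (by simpa using hc), set_append_cons, hstep _, hlen1 _, ih]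
          simp [fuse2, hp', hd', hc']
    · have hp' : ¬ PySem.List.pyGet? s.toList 0 = some '@' := by simpa using hp
      rw [if_neg hp, hstep s, hlen1 s, ih]
      simp [fuse2, hp']

theorem passB2_eq (r : List String) (acc : List String) (k : PySem.Dict String Int) (n : Int) :
    (r.foldl (fun (st : List String × PySem.Dict String Int × Int) line =>
      if PySem.Str.pyGet? line 0 = some '@' then
        if ¬ PySem.Str.strIsdigit (PySem.Str.stripChars line "@") then
          if ¬ st.2.1.contains (PySem.Str.stripChars line "@") then
            (st.1 ++ ["@" ++ PySem.Int.toStr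
                ((st.2.1.insert (PySem.Str.stripChars line "@") st.2.2).getD
                  (PySem.Str.stripChars line "@") 0)],
             st.2.1.insert (PySem.Str.stripChars line "@") st.2.2, st.2.2 + 1)
          else (st.1 ++ ["@" ++ PySem.Int.toStr (st.2.1.getD (PySem.Str.stripChars line "@") 0)], st.2)
        else (st.1 ++ [line], st.2)
      else (st.1 ++ [line], st.2)) (acc, k, n)).1
    = acc ++ fuse2 r k n := by
  induction r generalizing acc k n with
  | nil => simp [fuse2]
  | cons s r ih =>
    simp only [List.foldl_cons]
    by_cases hp : PySem.Str.pyGet? s 0 = some '@'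
    · have hp' : PySem.List.pyGet? s.toList 0 = some '@' := by simpa using hp
      rw [if_pos hp]
      by_cases hd : PySem.Str.strIsdigit (PySem.Str.stripChars s "@") = true
      · have hd' : PySem.Chars.strIsdigit (PySem.Chars.stripChars s.toList ['@']) = true := by
          simpa using hd
        rw [if_neg (by simpa using hd), ih]
        simp [fuse2, hp', hd']
      · have hd' : PySem.Chars.strIsdigit (PySem.Chars.stripChars s.toList ['@']) = false := by
          simpa using hd
        rw [if_pos (by simpa using hd)]
        by_cases hc : k.contains (PySem.Str.stripChars s "@") = true
        · rw [if_neg (by simpa using hc), ih]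
          simp [fuse2, hp', hd', hc]
        · have hc' : k.contains (PySem.Str.stripChars s "@") = false := by simpa using hc
          rw [if_pos (by simpa using hc), ih]
          simp [fuse2, hp', hd', hc']
    · have hp' : ¬ PySem.List.pyGet? s.toList 0 = some '@' := by simpa using hp
      rw [if_neg hp, ih]
      simp [fuse2, hp']

theorem passB1_clean (file : List String) (st : List String × PySem.Dict String Int) :
    file.foldl (fun (st : List String × PySem.Dict String Int) raw =>
      if cleanLine raw = "" then st
      else if PySem.Str.pyGet? (cleanLine raw) 0 = some '(' then
        (st.1, st.2.insert (PySem.Str.stripChars (cleanLine raw) "()") (st.1.length : Int))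
      else (st.1 ++ [cleanLine raw], st.2)) st
    = ((file.map cleanLine).filter (· ≠ "")).foldl (fun (st : List String × PySem.Dict String Int) line =>
        if PySem.Str.pyGet? line 0 = some '(' then
          (st.1, st.2.insert (PySem.Str.stripChars line "()") (st.1.length : Int))
        else (st.1 ++ [line], st.2)) st := by
  induction file generalizing st with
  | nil => rw [List.map_nil, List.filter_nil, List.foldl_nil, List.foldl_nil]
  | cons x r ih =>
    rw [List.foldl_cons, List.map_cons, List.filter_cons]
    by_cases h : cleanLine x = ""
    · rw [if_pos h, ih, if_neg (fun hd => (of_decide_eq_true hd : cleanLine x ≠ "") h)]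
    · rw [if_neg h, ih, if_pos (decide_eq_true h), List.foldl_cons]

theorem popLabels_zero (r : List String) (k : PySem.Dict String Int) :
    popLabels r k 0 = fuse1 r k 0 := by
  simpa using popLabels_eq_fuse1 r [] k

theorem resolvePass_zero (r : List String) (k : PySem.Dict String Int) (n : Int) :
    resolvePass r k n 0 = fuse2 r k n := by
  simpa using resolvePass_eq_fuse2 r [] k n

-- ===== VERDICT (by name: the statement is the Claim_ definition above) =====
theorem ClearFile_spec : Claim_equal_ClearFile := by
  intro file _
  unfold Spec_ClearFile ClearFile ClearFile_alt
  simp only []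
  rw [passA1_gen file [], List.nil_append, passB1_clean, passB1_eq, popLabels_zero,
      passB2_eq, resolvePass_zero]
  simp
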